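-- pv_equiv track=rewrite | github.com/Marshal1101/DataStructure-Algorithm-Study | programmers/07_stack-queue_01_development.py | solution
-- ===== SOURCE A (Python) =====
-- def solution(progresses, speeds):
--     answer = []
--     # 리스트를 역순으로 하여 스택
--     progresses.reverse()
--     speeds.reverse()
--     while progresses :
--         for i in range(len(progresses)) :
--             progresses[i] += speeds[i]
--         cnt = 0
--         # 가장 먼저 나와야할 연구가 100이 되어야만 pop
--         while progresses and progresses[-1] >= 100 :
--             progresses.pop()
--             speeds.pop()
--             cnt += 1
--         if cnt > 0 :
--             answer.append(cnt)
--
--     return answer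
-- ===== SOURCE B (Python) =====
-- def solution(progresses, speeds):
--     # Closed form: each task needs d = ceil((100-p)/s) days (at least 1); one pass
--     # groups tasks by the running-max finish day of the group leader.
--     answer = []
--     leader = 0
--     count = 0
--     for p, s in zip(progresses, speeds):
--         d = 1 if p + s >= 100 else -(-(100 - p) // s)
--         if d > leader:
--             if count:
--                 answer.append(count)
--             leader = d
--             count = 1
--         else:
--             count += 1
--     if count:
--         answer.append(count)
--     return answer
-- ===== Notes on version B (the rewrite author's own statement) =====
-- stated objective: alternative
-- what changed: A simulates progress day by day over the whole remaining list; B computes each task's finish day in closed form with ceiling division and groups tasks in a single pass by the running-max leader day.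
-- outside the precondition, e.g. on solution([110], [-5]): A returns [1], B returns [1]; on solution([95, 50], [90, 1, 10]): A returns [2], B returns [1, 1]
import Mathlib
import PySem

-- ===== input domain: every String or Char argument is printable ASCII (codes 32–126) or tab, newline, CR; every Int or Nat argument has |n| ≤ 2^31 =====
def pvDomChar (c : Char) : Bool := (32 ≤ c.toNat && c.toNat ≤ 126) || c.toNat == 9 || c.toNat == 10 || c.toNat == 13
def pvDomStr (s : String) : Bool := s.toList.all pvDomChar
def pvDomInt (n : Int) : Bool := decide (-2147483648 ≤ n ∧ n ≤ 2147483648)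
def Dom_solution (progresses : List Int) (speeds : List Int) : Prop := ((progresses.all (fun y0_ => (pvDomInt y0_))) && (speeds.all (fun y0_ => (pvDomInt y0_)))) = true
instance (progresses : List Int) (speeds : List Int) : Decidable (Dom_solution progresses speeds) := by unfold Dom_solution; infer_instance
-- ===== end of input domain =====

-- B replaces A's day-by-day simulation by a closed-form ceil-days computation with a single
-- grouping pass (objective: alternative). Note: the Python A mutates its arguments in place
-- (reverses and pops them); the equivalence proved here is about the RETURN value only.

-- ===== PORT A =====
-- Python A reverses both lists and treats the TAIL as the front of the queue (pop()).
-- The port keeps the same stack with its top at the HEAD (original order, pop = tail of the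
-- list): under Pre_ (equal lengths) this is the identical sequence of states and pops.

-- 'for i in range(len(progresses)): progresses[i] += speeds[i]'
-- (the branch where speeds is exhausted is Python's IndexError, excluded by Pre_)
def addAll : List Int → List Int → List Int
  | [], _ => []
  | p :: ps, [] => p :: ps
  | p :: ps, s :: ss => (p + s) :: addAll ps ss

-- 'while progresses and progresses[-1] >= 100: progresses.pop(); speeds.pop(); cnt += 1'
def popReady : List Int → List Int → Int → List Int × List Int × Int
  | p :: ps, s :: ss, cnt =>
      if p ≥ 100 then popReady ps ss (cnt + 1) else (p :: ps, s :: ss, cnt)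
  | ps, ss, cnt => (ps, ss, cnt)

-- 'while progresses : …' — the fuel argument only bounds the number of days; under Pre_
-- every task finishes within 102 + |p| days, so the fuel below is never exhausted.
def mainLoop : Nat → List Int → List Int → List Int → List Int
  | 0, _, _, answer => answer
  | _ + 1, [], _, answer => answer
  | fuel + 1, p :: ps, ss, answer =>
      let ps1 := addAll (p :: ps) ss
      let r := popReady ps1 ss 0
      mainLoop fuel r.1 r.2.1 (if r.2.2 > 0 then answer ++ [r.2.2] else answer)

def solution (progresses : List Int) (speeds : List Int) : List Int :=
  mainLoop (progresses.foldl (fun a p => a + 102 + p.natAbs) 1) progresses speeds []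

-- ===== PORT B =====
-- 'for p, s in zip(...)' grouping loop of Source B, with (leader, count) as the running state
def groupLoop : List Int → Int → Int → List Int → List Int
  | [], _, count, answer => if count ≠ 0 then answer ++ [count] else answer
  | d :: ds, leader, count, answer =>
      if d > leader then groupLoop ds d 1 (if count ≠ 0 then answer ++ [count] else answer)
      else groupLoop ds leader (count + 1) answer

def solution_alt (progresses : List Int) (speeds : List Int) : List Int :=
  let days := (progresses.zip speeds).map
    (fun q => if q.1 + q.2 ≥ 100 then (1 : Int) else -(PySem.Int.floordiv (-(100 - q.1)) q.2))
  groupLoop days 0 0 []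

-- ===== PRECONDITION & SPEC =====
-- Pre_ excludes nonpositive speeds (there A loops forever whenever some task can never reach
-- 100, and where it does return, the value depends on when the blocked task is inspected)
-- and length-mismatched lists (speeds shorter is an IndexError; speeds longer pairs tasks
-- with the TRAILING speeds, an artefact of A's reverse-and-pop encoding).
def Pre_solution (progresses : List Int) (speeds : List Int) : Prop :=
  progresses = [] ∨ (progresses.length = speeds.length ∧ ∀ s ∈ speeds, 1 ≤ s)
instance (progresses : List Int) (speeds : List Int) : Decidable (Pre_solution progresses speeds) := by
  unfold Pre_solution; infer_instance

def pvWitness_solution : List Int × List Int := ([93, 30, 55], [1, 30, 5])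

def Spec_solution (progresses : List Int) (speeds : List Int) (out : List Int) : Prop := out = solution_alt progresses speeds
instance (progresses : List Int) (speeds : List Int) (out : List Int) : Decidable (Spec_solution progresses speeds out) := by unfold Spec_solution; infer_instance

-- ===== CLAIM (what is proved, stated in full; the proofs are below) =====
def Claim_equal_solution : Prop := ∀ (progresses : List Int) (speeds : List Int), Dom_solution progresses speeds → Pre_solution progresses speeds → Spec_solution progresses speeds (solution progresses speeds)

-- ===== LEMMAS AND PROOFS =====

-- days a task (p, s) needs: first d ≥ 1 with p + d*s ≥ 100 (for s ≥ 1)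
def dd (p s : Int) : Int := if p + s ≥ 100 then (1 : Int) else -(PySem.Int.floordiv (-(100 - p)) s)

def ddL : List Int → List Int → List Int
  | p :: ps, s :: ss => dd p s :: ddL ps ss
  | _, _ => []

-- one day passes
def dec (d : Int) : Int := if d ≥ 2 then d - 1 else d

-- split off the maximal ready prefix (tasks with p + s ≥ 100): (count, rest ps, rest ss)
def split100 : List Int → List Int → Int × List Int × List Int
  | p :: ps, s :: ss =>
      if p + s ≥ 100 then
        ((split100 ps ss).1 + 1, (split100 ps ss).2.1, (split100 ps ss).2.2)
      else (0, p :: ps, s :: ss)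
  | ps, ss => (0, ps, ss)

-- maximal prefix of values ≤ m : (count, rest)
def takeLen (m : Int) : List Int → Int × List Int
  | [] => (0, [])
  | d :: ds => if d ≤ m then ((takeLen m ds).1 + 1, (takeLen m ds).2) else (0, d :: ds)

theorem takeLen_length (m : Int) (ds : List Int) : (takeLen m ds).2.length ≤ ds.length := by
  induction ds with
  | nil => simp [takeLen]
  | cons d ds ih => simp only [takeLen]; split <;> simp <;> omega

-- the functional spec both loops compute: group sizes by running-max leader
def grp : List Int → List Int
  | [] => []
  | d :: ds => (1 + (takeLen d ds).1) :: grp (takeLen d ds).2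
termination_by ds => ds.length
decreasing_by exact Nat.lt_succ_of_le (takeLen_length d ds)

-- ---- arithmetic facts about dd ----
theorem dd_ceil (p s : Int) (hs : 1 ≤ s) (h : ¬ p + s ≥ 100) :
    (dd p s - 1) * s < 100 - p ∧ 100 - p ≤ dd p s * s := by
  have h0 : 0 < s := by omega
  have := (PySem.Int.neg_floordiv_neg_eq_iff_of_pos (a := 100 - p) (b := s)
    (q := -(PySem.Int.floordiv (-(100 - p)) s)) h0).mp rfl
  simpa [dd, h] using this

theorem dd_ge_two (p s : Int) (hs : 1 ≤ s) (h : ¬ p + s ≥ 100) : 2 ≤ dd p s := by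
  obtain ⟨h1, h2⟩ := dd_ceil p s hs h
  by_contra hc
  have hle : dd p s - 1 ≤ 0 := by omega
  nlinarith

theorem dd_ge_one (p s : Int) (hs : 1 ≤ s) : 1 ≤ dd p s := by
  by_cases h : p + s ≥ 100
  · simp [dd, h]
  · have := dd_ge_two p s hs h; omega

theorem dd_step (p s : Int) (hs : 1 ≤ s) : dd (p + s) s = dec (dd p s) := by
  by_cases h : p + s ≥ 100
  · have h1 : dd p s = 1 := by simp [dd, h]
    have h2 : (p + s) + s ≥ 100 := by omega
    rw [h1]
    simp [dd, h2, dec]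
  · obtain ⟨hb1, hb2⟩ := dd_ceil p s hs h
    have h2 := dd_ge_two p s hs h
    have hdec : dec (dd p s) = dd p s - 1 := by simp [dec]; omega
    rw [hdec]
    by_cases h3 : (p + s) + s ≥ 100
    · -- dd p s = 2
      have hle : dd p s ≤ 2 := by nlinarith
      have he : dd p s = 2 := by omega
      rw [he]
      simp [dd, h3]
    · -- recurse one level: ceiling shifted by one
      have h0 : 0 < s := by omega
      have hu : dd (p + s) s = -(PySem.Int.floordiv (-(100 - (p + s))) s) := by
        simp [dd, h3]
      rw [hu, PySem.Int.neg_floordiv_neg_eq_iff_of_pos h0]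
      constructor <;> nlinarith

theorem dd_bound (p s : Int) (hs : 1 ≤ s) : dd p s ≤ 102 + (p.natAbs : Int) := by
  by_cases h : p + s ≥ 100
  · simp only [dd, if_pos h]; omega
  · obtain ⟨hb1, hb2⟩ := dd_ceil p s hs h
    have h2 := dd_ge_two p s hs h
    have : dd p s - 1 ≤ (dd p s - 1) * s := by nlinarith
    have : dd p s ≤ 100 - p := by omega
    omega

-- ---- popReady / addAll / split100 ----
theorem popReady_addAll (ps ss : List Int) (cnt : Int) :
    popReady (addAll ps ss) ss cnt =
      (addAll (split100 ps ss).2.1 (split100 ps ss).2.2, (split100 ps ss).2.2,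
        cnt + (split100 ps ss).1) := by
  induction ps generalizing ss cnt with
  | nil => cases ss <;> simp [addAll, popReady, split100]
  | cons p ps ih =>
      cases ss with
      | nil => simp [addAll, popReady, split100]
      | cons s ss =>
          by_cases h : p + s ≥ 100
          · have hc : cnt + 1 + (split100 ps ss).1 = cnt + ((split100 ps ss).1 + 1) := by omega
            simp only [addAll, popReady, split100, if_pos h]
            rw [ih ss (cnt + 1), hc]
          · simp only [addAll, popReady, split100, if_neg h]
            simp

theorem split100_count_nonneg (ps ss : List Int) : 0 ≤ (split100 ps ss).1 := by
  induction ps generalizing ss with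
  | nil => cases ss <;> simp [split100]
  | cons p ps ih =>
      cases ss with
      | nil => simp [split100]
      | cons s ss =>
          simp only [split100]; split
          · show 0 ≤ (split100 ps ss).1 + 1
            have := ih ss; omega
          · show (0 : Int) ≤ 0
            omega

theorem split100_speeds_sub (ps ss : List Int) : ∀ x ∈ (split100 ps ss).2.2, x ∈ ss := by
  induction ps generalizing ss with
  | nil => cases ss <;> simp [split100]
  | cons p ps ih =>
      cases ss with
      | nil => simp [split100]
      | cons s ss =>
          simp only [split100]; split
          · intro x hx; exact List.mem_cons_of_mem _ (ih ss x hx)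
          · intro x hx; exact hx

theorem split100_rest_not_ready (ps ss : List Int) :
    ∀ p' ps' s' ss', (split100 ps ss).2.1 = p' :: ps' → (split100 ps ss).2.2 = s' :: ss' →
      ¬ p' + s' ≥ 100 := by
  induction ps generalizing ss with
  | nil => cases ss <;> simp [split100]
  | cons p ps ih =>
      cases ss with
      | nil => simp [split100]
      | cons s ss =>
          simp only [split100]; split
          · exact ih ss
          · rename_i h
            intro p' ps' s' ss' h1 h2
            cases h1; cases h2; exact h

-- ---- ddL facts ----
theorem ddL_mem_ge_one (ps ss : List Int) (hv : ∀ s ∈ ss, 1 ≤ s) :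
    ∀ e ∈ ddL ps ss, 1 ≤ e := by
  induction ps generalizing ss with
  | nil => cases ss <;> simp [ddL]
  | cons p ps ih =>
      cases ss with
      | nil => simp [ddL]
      | cons s ss =>
          simp only [ddL, List.mem_cons]
          rintro e (rfl | he)
          · exact dd_ge_one p s (hv s (by simp))
          · exact ih ss (fun x hx => hv x (List.mem_cons_of_mem _ hx)) e he

theorem ddL_addAll (ps ss : List Int) (hv : ∀ s ∈ ss, 1 ≤ s) :
    ddL (addAll ps ss) ss = (ddL ps ss).map dec := by
  induction ps generalizing ss with
  | nil => cases ss <;> simp [addAll, ddL]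
  | cons p ps ih =>
      cases ss with
      | nil => simp [addAll, ddL]
      | cons s ss =>
          simp only [addAll, ddL, List.map_cons]
          rw [dd_step p s (hv s (by simp)), ih ss (fun x hx => hv x (List.mem_cons_of_mem _ hx))]

theorem ddL_head_eq_one (p s : Int) (hs : 1 ≤ s) (h : p + s ≥ 100) : dd p s = 1 := by
  simp [dd, h]

-- takeLen with threshold 1 on ddL is exactly split100
theorem takeLen_one_ddL (ps ss : List Int) (hv : ∀ s ∈ ss, 1 ≤ s) :
    takeLen 1 (ddL ps ss) =
      ((split100 ps ss).1, ddL (split100 ps ss).2.1 (split100 ps ss).2.2) := by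
  induction ps generalizing ss with
  | nil => cases ss <;> simp [ddL, takeLen, split100]
  | cons p ps ih =>
      cases ss with
      | nil => simp [ddL, takeLen, split100]
      | cons s ss =>
          have hs : 1 ≤ s := hv s (by simp)
          by_cases h : p + s ≥ 100
          · have h1 : dd p s = 1 := ddL_head_eq_one p s hs h
            have hrec := ih ss (fun x hx => hv x (List.mem_cons_of_mem _ hx))
            show takeLen 1 (dd p s :: ddL ps ss) = _
            rw [takeLen, if_pos (by omega : dd p s ≤ 1), hrec]
            simp only [split100, if_pos h]
          · have h2 := dd_ge_two p s hs h
            show takeLen 1 (dd p s :: ddL ps ss) = _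
            rw [takeLen, if_neg (by omega : ¬ dd p s ≤ 1)]
            simp only [split100, if_neg h, ddL]

-- ---- takeLen generic facts ----
theorem takeLen_rest_mem (m : Int) (ds : List Int) : ∀ x ∈ (takeLen m ds).2, x ∈ ds := by
  induction ds with
  | nil => simp [takeLen]
  | cons d ds ih =>
      simp only [takeLen]; split
      · intro x hx; exact List.mem_cons_of_mem _ (ih x hx)
      · intro x hx; exact hx

theorem takeLen_rest_head (m : Int) (ds : List Int) :
    ∀ e t, (takeLen m ds).2 = e :: t → m < e := by
  induction ds with
  | nil => simp [takeLen]
  | cons d ds ih =>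
      simp only [takeLen]; split
      · exact ih
      · rename_i h; intro e t h1; cases h1; omega

theorem takeLen_sum_le (m : Int) (ds : List Int) (h1 : ∀ e ∈ ds, 1 ≤ e) :
    (takeLen m ds).1 + (takeLen m ds).2.sum ≤ ds.sum := by
  induction ds with
  | nil => simp [takeLen]
  | cons d ds ih =>
      simp only [takeLen]; split
      · have := ih (fun e he => h1 e (List.mem_cons_of_mem _ he))
        have hd : 1 ≤ d := h1 d (by simp)
        simp [List.sum_cons]; omega
      · simp

theorem sum_nonneg_of_ge_one (ds : List Int) (h : ∀ e ∈ ds, 1 ≤ e) : 0 ≤ ds.sum := by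
  induction ds with
  | nil => simp
  | cons d ds ih =>
      have := ih (fun e he => h e (List.mem_cons_of_mem _ he))
      have := h d (by simp)
      simp [List.sum_cons]; omega

-- decrementing a day preserves the grouping when no task is ready (leader ≥ 2)
theorem takeLen_dec (m : Int) (ds : List Int) (hm : 2 ≤ m) (h1 : ∀ e ∈ ds, 1 ≤ e) :
    takeLen (m - 1) (ds.map dec) = ((takeLen m ds).1, (takeLen m ds).2.map dec) := by
  induction ds with
  | nil => simp [takeLen]
  | cons d ds ih =>
      have hd : 1 ≤ d := h1 d (by simp)
      have ht := ih (fun e he => h1 e (List.mem_cons_of_mem _ he))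
      by_cases h : d ≤ m
      · have hdec : dec d ≤ m - 1 := by simp [dec]; omega
        simp only [List.map_cons, takeLen, if_pos h, if_pos hdec, ht]
      · have hdec : ¬ dec d ≤ m - 1 := by simp [dec]; omega
        simp only [List.map_cons, takeLen, if_neg h, if_neg hdec]

theorem grp_dec (n : Nat) : ∀ ds : List Int, ds.length ≤ n → (∀ e ∈ ds, 1 ≤ e) →
    (∀ e t, ds = e :: t → 2 ≤ e) → grp (ds.map dec) = grp ds := by
  induction n with
  | zero =>
      intro ds hlen _ _
      have : ds = [] := List.eq_nil_of_length_eq_zero (by omega)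
      simp [this, grp]
  | succ n ih =>
      intro ds hlen h1 hhead
      cases ds with
      | nil => simp [grp]
      | cons d ds =>
          have hd2 : 2 ≤ d := hhead d ds rfl
          have h1' : ∀ e ∈ ds, 1 ≤ e := fun e he => h1 e (List.mem_cons_of_mem _ he)
          have hdec : dec d = d - 1 := by simp [dec]; omega
          simp only [List.map_cons, grp, hdec]
          rw [takeLen_dec d ds hd2 h1']
          congr 1
          exact ih (takeLen d ds).2
            (by have := takeLen_length d ds; simp at hlen ⊢; omega)
            (fun e he => h1' e (takeLen_rest_mem d ds e he))
            (fun e t het => by have := takeLen_rest_head d ds e t het; omega)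

-- ---- the main simulation lemma ----
theorem dec_le (e : Int) (h : 1 ≤ e) : dec e ≤ e := by simp [dec]; omega

theorem sum_map_dec_le (ds : List Int) (h : ∀ e ∈ ds, 1 ≤ e) :
    (ds.map dec).sum ≤ ds.sum := by
  induction ds with
  | nil => simp
  | cons d ds ih =>
      have := dec_le d (h d (by simp))
      have := ih (fun e he => h e (List.mem_cons_of_mem _ he))
      simp [List.sum_cons]; omega

theorem mainLoop_eq_grp (fuel : Nat) : ∀ ps ss answer, (∀ s ∈ ss, 1 ≤ s) →
    (ddL ps ss).sum ≤ (fuel : Int) →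
    mainLoop fuel ps ss answer = answer ++ grp (ddL ps ss) := by
  induction fuel with
  | zero =>
      intro ps ss answer hv hsum
      have hnil : ddL ps ss = [] := by
        cases hdd : ddL ps ss with
        | nil => rfl
        | cons e t =>
            exfalso
            have h1 : ∀ x ∈ ddL ps ss, 1 ≤ x := ddL_mem_ge_one ps ss hv
            have he : 1 ≤ e := h1 e (by rw [hdd]; simp)
            have ht : 0 ≤ t.sum :=
              sum_nonneg_of_ge_one t (fun x hx => h1 x (by rw [hdd]; exact List.mem_cons_of_mem _ hx))
            rw [hdd] at hsum; simp [List.sum_cons] at hsum; omega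
      rw [hnil]
      cases ps with
      | nil => simp [mainLoop, grp]
      | cons p ps =>
          cases ss with
          | nil => simp [mainLoop, grp]
          | cons s ss => simp [ddL] at hnil
  | succ fuel ih =>
      intro ps ss answer hv hsum
      cases ps with
      | nil => simp [mainLoop, ddL, grp]
      | cons p ps =>
          cases ss with
          | nil =>
              -- speeds exhausted: ddL = [], state loops unchanged until fuel runs out
              simp only [mainLoop, addAll, popReady]
              rw [if_neg (lt_irrefl (0 : Int)), ih (p :: ps) [] answer (by simp) (by simp [ddL])]
          | cons s ss =>
              have hs : 1 ≤ s := hv s (by simp)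
              have hv' : ∀ x ∈ ss, 1 ≤ x := fun x hx => hv x (List.mem_cons_of_mem _ hx)
              have hall : ∀ e ∈ ddL (p :: ps) (s :: ss), 1 ≤ e := ddL_mem_ge_one _ _ hv
              simp only [mainLoop]
              rw [popReady_addAll (p :: ps) (s :: ss) 0]
              by_cases hready : p + s ≥ 100
              · -- some tasks pop today
                have hsplit : split100 (p :: ps) (s :: ss) =
                    ((split100 ps ss).1 + 1, (split100 ps ss).2.1, (split100 ps ss).2.2) := by
                  simp [split100, hready]
                have hj0 : 0 ≤ (split100 ps ss).1 := split100_count_nonneg ps ss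
                rw [hsplit]
                set j' := (split100 ps ss).1 with hjdef
                set ps' := (split100 ps ss).2.1 with hpsdef
                set ss' := (split100 ps ss).2.2 with hssdef
                have hv'' : ∀ x ∈ ss', 1 ≤ x := fun x hx => hv' x (split100_speeds_sub ps ss x hx)
                have hrest_mem : ∀ e ∈ ddL ps' ss', 1 ≤ e := ddL_mem_ge_one ps' ss' hv''
                have hrest_head : ∀ e t, ddL ps' ss' = e :: t → 2 ≤ e := by
                  intro e t het
                  cases hps'' : ps' with
                  | nil => rw [hps''] at het; simp [ddL] at het
                  | cons p0 ps0 =>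
                      cases hss'' : ss' with
                      | nil => rw [hps'', hss''] at het; simp [ddL] at het
                      | cons s0 ss0 =>
                          rw [hps'', hss''] at het
                          simp only [ddL] at het
                          have hnr := split100_rest_not_ready ps ss p0 ps0 s0 ss0
                            (by rw [← hpsdef, hps'']) (by rw [← hssdef, hss''])
                          have hs0 : 1 ≤ s0 := hv'' s0 (by rw [hss'']; simp)
                          have := dd_ge_two p0 s0 hs0 hnr
                          cases het; omega
                have htake : takeLen 1 (ddL (p :: ps) (s :: ss)) = (j' + 1, ddL ps' ss') := by
                  rw [takeLen_one_ddL (p :: ps) (s :: ss) hv, hsplit]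
                have hsumr : (j' + 1) + (ddL ps' ss').sum ≤ (ddL (p :: ps) (s :: ss)).sum := by
                  have := takeLen_sum_le 1 (ddL (p :: ps) (s :: ss)) hall
                  rw [htake] at this; exact this
                have hbound : ((ddL ps' ss').map dec).sum ≤ (fuel : Int) := by
                  have := sum_map_dec_le (ddL ps' ss') hrest_mem
                  push_cast at hsum ⊢; omega
                rw [if_pos (by omega : (0 : Int) + (j' + 1) > 0)]
                rw [ih (addAll ps' ss') ss' _ hv'' (by rw [ddL_addAll ps' ss' hv'']; exact hbound)]
                rw [ddL_addAll ps' ss' hv'']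
                rw [grp_dec (ddL ps' ss').length (ddL ps' ss') (le_refl _) hrest_mem hrest_head]
                -- right-hand side: grp (1 :: ddL ps ss) peels the ready group
                have hdd1 : dd p s = 1 := ddL_head_eq_one p s hs hready
                have htake' : takeLen 1 (ddL ps ss) = (j', ddL ps' ss') := by
                  rw [takeLen_one_ddL ps ss hv']
                show (answer ++ [0 + (j' + 1)]) ++ grp (ddL ps' ss') =
                  answer ++ grp (ddL (p :: ps) (s :: ss))
                simp only [ddL, hdd1, grp, htake']
                simp [Int.add_comm]
              · -- nobody pops today
                have hsplit : split100 (p :: ps) (s :: ss) = (0, p :: ps, s :: ss) := by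
                  simp [split100, hready]
                rw [hsplit]
                have h2 : 2 ≤ dd p s := dd_ge_two p s hs hready
                have hbound : ((ddL (p :: ps) (s :: ss)).map dec).sum ≤ (fuel : Int) := by
                  have htail : ∀ e ∈ ddL ps ss, 1 ≤ e := ddL_mem_ge_one ps ss hv'
                  have := sum_map_dec_le (ddL ps ss) htail
                  have hdecd : dec (dd p s) = dd p s - 1 := by simp [dec]; omega
                  simp only [ddL, List.map_cons, List.sum_cons, hdecd] at *
                  push_cast at hsum ⊢; omega
                rw [if_neg (by omega : ¬ (0 : Int) + 0 > 0)]
                rw [ih (addAll (p :: ps) (s :: ss)) (s :: ss) _ hv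
                  (by rw [ddL_addAll (p :: ps) (s :: ss) hv]; exact hbound)]
                rw [ddL_addAll (p :: ps) (s :: ss) hv]
                rw [grp_dec (ddL (p :: ps) (s :: ss)).length _ (le_refl _) hall
                  (by intro e t het; simp only [ddL] at het; cases het; omega)]

-- ---- the fuel is sufficient ----
theorem foldl_fuel_eq (ps : List Int) : ∀ a : Nat,
    ps.foldl (fun a p => a + 102 + p.natAbs) a = a + (ps.map (fun p => 102 + p.natAbs)).sum := by
  induction ps with
  | nil => intro a; simp
  | cons p ps ih => intro a; simp [List.foldl_cons, ih]; omega

theorem ddL_sum_le (ps ss : List Int) (hv : ∀ s ∈ ss, 1 ≤ s) :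
    (ddL ps ss).sum ≤ (ps.map (fun p => 102 + (p.natAbs : Int))).sum := by
  induction ps generalizing ss with
  | nil => cases ss <;> simp [ddL]
  | cons p ps ih =>
      have h0 : (0 : Int) ≤ (ps.map (fun p => 102 + (p.natAbs : Int))).sum := by
        refine List.sum_nonneg ?_
        intro x hx
        simp only [List.mem_map] at hx
        obtain ⟨p', _, rfl⟩ := hx
        positivity
      cases ss with
      | nil =>
          simp only [ddL, List.map_cons, List.sum_cons, List.sum_nil]
          omega
      | cons s ss =>
          have h1 := dd_bound p s (hv s (by simp))
          have h2 := ih ss (fun x hx => hv x (List.mem_cons_of_mem _ hx))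
          simp only [ddL, List.map_cons, List.sum_cons] at *
          omega

theorem cast_fuel_sum (ps : List Int) :
    (((ps.map (fun p => 102 + p.natAbs)).sum : Nat) : Int) =
      (ps.map (fun p => 102 + (p.natAbs : Int))).sum := by
  induction ps with
  | nil => simp
  | cons p ps ih =>
      simp only [List.map_cons, List.sum_cons]
      push_cast [ih]
      omega

-- ---- the B-side grouping loop computes grp ----
theorem groupLoop_eq_grp (ds : List Int) : ∀ leader count answer, 1 ≤ count →
    groupLoop ds leader count answer =
      answer ++ (count + (takeLen leader ds).1) :: grp (takeLen leader ds).2 := by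
  induction ds with
  | nil =>
      intro leader count answer hc
      have hc' : count ≠ 0 := by omega
      simp [groupLoop, takeLen, grp, hc']
  | cons d ds ih =>
      intro leader count answer hc
      by_cases h : d > leader
      · have hc' : count ≠ 0 := by omega
        rw [groupLoop, if_pos h, if_pos hc', ih d 1 _ (by omega)]
        have ht : takeLen leader (d :: ds) = (0, d :: ds) := by
          rw [takeLen, if_neg (by omega : ¬ d ≤ leader)]
        rw [ht]
        simp [grp]
      · have h' : d ≤ leader := not_lt.mp h
        rw [groupLoop, if_neg h, ih leader (count + 1) answer (by omega)]
        have ht : takeLen leader (d :: ds) = ((takeLen leader ds).1 + 1, (takeLen leader ds).2) := by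
          rw [takeLen, if_pos h']
        rw [ht]
        have : count + ((takeLen leader ds).1 + 1) = count + 1 + (takeLen leader ds).1 := by omega
        rw [this]

theorem zipmap_eq_ddL (ps ss : List Int) :
    (ps.zip ss).map
      (fun q => if q.1 + q.2 ≥ 100 then (1 : Int) else -(PySem.Int.floordiv (-(100 - q.1)) q.2)) =
      ddL ps ss := by
  induction ps generalizing ss with
  | nil => cases ss <;> simp [ddL]
  | cons p ps ih =>
      cases ss with
      | nil => simp [ddL]
      | cons s ss => simp only [List.zip_cons_cons, List.map_cons, ddL, dd, ih ss]

theorem alt_eq_grp (ps ss : List Int) (hv : ∀ s ∈ ss, 1 ≤ s) :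
    solution_alt ps ss = grp (ddL ps ss) := by
  unfold solution_alt
  rw [zipmap_eq_ddL]
  cases hdd : ddL ps ss with
  | nil => simp [groupLoop, grp]
  | cons d ds =>
      have hd : 1 ≤ d := ddL_mem_ge_one ps ss hv d (by rw [hdd]; simp)
      rw [groupLoop, if_pos (by omega : d > 0), if_neg (by omega : ¬ (0 : Int) ≠ 0),
        groupLoop_eq_grp ds d 1 [] (by omega)]
      simp [grp]

-- ===== VERDICT (by name: the statement is the Claim_ definition above) =====
theorem solution_spec : Claim_equal_solution := by
  intro ps ss _ hpre
  rcases hpre with rfl | ⟨hlen, hv⟩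
  · rfl
  unfold Spec_solution solution
  rw [mainLoop_eq_grp _ ps ss [] hv ?bound, alt_eq_grp ps ss hv]
  · simp
  case bound =>
    rw [foldl_fuel_eq ps 1]
    have h := ddL_sum_le ps ss hv
    rw [Nat.cast_add, Nat.cast_one, cast_fuel_sum ps]
    omega
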